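-- pv_equiv track=rewrite | github.com/CokeFung/introduction2NLP2020 | Lab01_word_cloud/word_cloud.py | check_word
-- ===== SOURCE A (Python) =====
-- def check_word(string):
-- 	alp = "abcdefghijklmnopqrstuvwxyz".upper()
-- 	if len(string) < 2:
-- 		return False
-- 	for i in alp:
-- 		if i in string:
-- 			return True
-- 	return False
-- ===== SOURCE B (Python) =====
-- def check_word(string):
-- 	if len(string) < 2:
-- 		return False
-- 	for c in string:
-- 		if 'A' <= c <= 'Z':
-- 			return True
-- 	return False
-- ===== Notes on version B (the rewrite author's own statement) =====
-- stated objective: idiomatic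
-- what changed: Instead of testing each of the 26 uppercase letters for substring membership in the string, B makes a single left-to-right pass over the string's characters and returns True at the first character in the uppercase ASCII range.
import Mathlib
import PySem

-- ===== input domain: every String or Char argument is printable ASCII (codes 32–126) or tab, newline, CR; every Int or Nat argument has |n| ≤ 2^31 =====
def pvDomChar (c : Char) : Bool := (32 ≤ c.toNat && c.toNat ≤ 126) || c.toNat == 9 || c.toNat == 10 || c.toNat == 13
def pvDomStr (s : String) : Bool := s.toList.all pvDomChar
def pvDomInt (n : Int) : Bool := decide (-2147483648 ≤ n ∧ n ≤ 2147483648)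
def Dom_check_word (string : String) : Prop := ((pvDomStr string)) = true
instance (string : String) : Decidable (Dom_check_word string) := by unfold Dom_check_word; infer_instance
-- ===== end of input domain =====

-- B replaces A's 26 substring scans (one per uppercase letter) by a single pass over the string's characters.

-- ===== PORT A =====
def check_word (string : String) : Bool :=
  let alp := PySem.Str.upper "abcdefghijklmnopqrstuvwxyz"
  if PySem.Str.len string < 2 then false
  else alp.toList.any (fun i => PySem.Str.isIn (String.ofList [i]) string)

-- ===== PORT B =====
def check_word_alt (string : String) : Bool :=
  if PySem.Str.len string < 2 then false
  else string.toList.any (fun c => 'A' ≤ c && c ≤ 'Z')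

-- ===== PRECONDITION & SPEC =====
def Spec_check_word (string : String) (out : Bool) : Prop := out = check_word_alt string
instance (string : String) (out : Bool) : Decidable (Spec_check_word string out) := by unfold Spec_check_word; infer_instance

-- ===== CLAIM (what is proved, stated in full; the proofs are below) =====
def Claim_equal_check_word : Prop := ∀ (string : String), Dom_check_word string → Spec_check_word string (check_word string)

-- ===== LEMMAS AND PROOFS =====

-- a one-character string is a substring iff the character occurs
theorem singleton_isIn_iff (c : Char) (t : List Char) :
    PySem.Chars.isIn [c] t = true ↔ c ∈ t := by
  rw [PySem.Chars.isIn_iff_infix]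
  constructor
  · rintro ⟨s, u, h⟩
    simp [← h]
  · intro h
    obtain ⟨s, u, h⟩ := List.append_of_mem h
    exact ⟨s, u, by simp [h]⟩

theorem mem_upper_iff (c : Char) :
    c ∈ (PySem.Str.upper "abcdefghijklmnopqrstuvwxyz").toList ↔ ('A' ≤ c && c ≤ 'Z') = true := by
  have hl : (PySem.Str.upper "abcdefghijklmnopqrstuvwxyz").toList =
      ['A','B','C','D','E','F','G','H','I','J','K','L','M',
       'N','O','P','Q','R','S','T','U','V','W','X','Y','Z'] := by decide
  rw [hl]
  constructor
  · intro h
    fin_cases h <;> decide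
  · intro h
    obtain ⟨h1, h2⟩ : 'A' ≤ c ∧ c ≤ 'Z' := by simpa using h
    have hb1 : (65 : Nat) ≤ c.toNat := UInt32.le_iff_toNat_le.mp (Char.le_def.mp h1)
    have hb2 : c.toNat ≤ 90 := UInt32.le_iff_toNat_le.mp (Char.le_def.mp h2)
    have : c = Char.ofNat c.toNat := by
      simp [Char.ofNat_toNat]
    rw [this]
    interval_cases h : c.toNat <;> decide

-- ===== VERDICT (by name: the statement is the Claim_ definition above) =====
theorem check_word_spec : Claim_equal_check_word := by
  intro s _
  unfold Spec_check_word check_word check_word_alt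
  split
  · rfl
  · rw [Bool.eq_iff_iff]
    simp only [List.any_eq_true]
    constructor
    · rintro ⟨i, hi, hin⟩
      have : i ∈ s.toList := by
        have := (singleton_isIn_iff i s.toList).mp (by simpa [PySem.Str.isIn] using hin)
        exact this
      exact ⟨i, this, by simpa using (mem_upper_iff i).mp hi⟩
    · rintro ⟨c, hc, hrange⟩
      refine ⟨c, (mem_upper_iff c).mpr (by simpa using hrange), ?_⟩
      simpa [PySem.Str.isIn] using (singleton_isIn_iff c s.toList).mpr hc
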